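-- pv_equiv track=rewrite | github.com/leeminkyu1212/Algorithm | 프로그래머스/3/12938. 최고의 집합/최고의 집합.py | solution
-- ===== SOURCE A (Python) =====
-- def solution(n, s):
--     if s < n:
--         return [-1]
--
--     quotient = s // n
--     remainder = s % n
--
--     result = [quotient] * n
--     for i in range(remainder):
--         result[-(i + 1)] += 1
--
--     return result
-- ===== SOURCE B (Python) =====
-- def solution(n, s):
--     if s < n:
--         return [-1]
--     result = []
--     remaining = s
--     for slots in range(n, 0, -1):
--         v = remaining // slots
--         result.append(v)
--         remaining -= v
--     return result
-- ===== Notes on version B (the rewrite author's own statement) =====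
-- stated objective: alternative
-- what changed: Replaces the global divmod plus per-element increment loop with a greedy single pass that, for each remaining slot count, emits remaining//slots and subtracts it from the running sum, never computing s%n or touching the list again.
import Mathlib
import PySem

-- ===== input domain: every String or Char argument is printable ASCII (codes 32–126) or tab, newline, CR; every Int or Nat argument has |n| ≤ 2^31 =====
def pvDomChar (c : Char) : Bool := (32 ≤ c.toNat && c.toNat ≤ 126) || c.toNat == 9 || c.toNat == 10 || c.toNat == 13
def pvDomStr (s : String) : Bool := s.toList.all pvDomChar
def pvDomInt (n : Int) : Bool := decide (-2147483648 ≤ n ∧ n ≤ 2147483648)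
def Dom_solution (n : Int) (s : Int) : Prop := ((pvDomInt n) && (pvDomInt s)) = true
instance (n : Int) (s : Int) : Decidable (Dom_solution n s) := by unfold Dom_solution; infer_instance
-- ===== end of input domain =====

-- B replaces the global divmod + increment loop with a greedy pass emitting remaining//slots per slot (alternative algorithm, same cost).


-- ===== PORT A =====
-- result[-(i+1)] += 1 is ported with pyGetD/pySetD; inside Pre_ the index is always in range.
def solution (n : Int) (s : Int) : List Int :=
  if s < n then [-1]
  else
    let quotient := PySem.Int.floordiv s n
    let remainder := PySem.Int.mod s n
    let result := List.replicate n.toNat quotient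
    (PySem.List.pyRange 0 remainder 1).foldl
      (fun acc i => PySem.List.pySetD acc (-(i + 1)) (PySem.List.pyGetD acc (-(i + 1)) 0 + 1))
      result

-- ===== PORT B =====
-- Greedy pass: for slots = n, n-1, …, 1 append remaining // slots and subtract it.
def solution_alt (n : Int) (s : Int) : List Int :=
  if s < n then [-1]
  else
    ((PySem.List.pyRange n 0 (-1)).foldl
      (fun (st : List Int × Int) slots =>
        let v := PySem.Int.floordiv st.2 slots
        (st.1 ++ [v], st.2 - v))
      ([], s)).1

-- ===== PRECONDITION & SPEC =====
-- Pre_ excludes exactly n = 0 with 0 ≤ s, where A raises ZeroDivisionError.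
def Pre_solution (n : Int) (s : Int) : Prop := n ≠ 0 ∨ s < 0
instance (n : Int) (s : Int) : Decidable (Pre_solution n s) := by unfold Pre_solution; infer_instance
def pvWitness_solution : Int × Int := (3, 11)

def Spec_solution (n : Int) (s : Int) (out : List Int) : Prop := out = solution_alt n s
instance (n : Int) (s : Int) (out : List Int) : Decidable (Spec_solution n s out) := by unfold Spec_solution; infer_instance

-- ===== CLAIM (what is proved, stated in full; the proofs are below) =====
def Claim_equal_solution : Prop := ∀ (n : Int) (s : Int), Dom_solution n s → Pre_solution n s → Spec_solution n s (solution n s)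

-- ===== LEMMAS AND PROOFS =====

-- Setting the last cell of a constant block splits off a singleton.
theorem pv_set_last (m : Nat) (q v : Int) :
    (List.replicate (m + 1) q).set m v = List.replicate m q ++ [v] := by
  rw [List.replicate_succ', List.set_append_right _ _ (by simp)]
  simp

-- One increment step of A: bumping index -(k+1) in a list of length N turns the last q-cell
-- of the first block into the first (q+1)-cell of the second block.
theorem pv_step (N k : Nat) (q : Int) (hk : k + 1 ≤ N) :
    PySem.List.pySetD (List.replicate (N - k) q ++ List.replicate k (q + 1)) (-(((k : Int)) + 1))
      (PySem.List.pyGetD (List.replicate (N - k) q ++ List.replicate k (q + 1)) (-(((k : Int)) + 1)) 0 + 1)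
    = List.replicate (N - (k + 1)) q ++ List.replicate (k + 1) (q + 1) := by
  have hlen : (List.replicate (N - k) q ++ List.replicate k (q + 1)).length = N := by
    simp; omega
  have hcast : -(((k : Int)) + 1) = -(((k + 1 : Nat) : Int)) := by push_cast; ring
  rw [hcast, PySem.List.pyGetD_neg_natCast _ _ _ (by omega) (by omega)]
  simp only [PySem.List.pySetD, PySem.List.pySet?, PySem.List.pyIdx?, hlen]
  rw [if_neg (by push_cast; omega), if_pos (by push_cast; omega)]
  simp only [neg_neg, Int.toNat_natCast, Option.map_some, Option.getD_some]
  rw [List.getElem_append_left (by simp; omega), List.getElem_replicate]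
  rw [List.set_append_left _ _ (by simp; omega)]
  rw [show N - k = (N - (k + 1)) + 1 from by omega]
  rw [pv_set_last (N - (k + 1)) q (q + 1), List.append_assoc]
  simp [List.replicate_succ]

-- A's loop invariant: after r increments the list is two constant blocks.
theorem pv_loop (N r : Nat) (q : Int) (hr : r ≤ N) :
    (PySem.List.pyRange 0 (r : Int) 1).foldl
      (fun acc i => PySem.List.pySetD acc (-(i + 1)) (PySem.List.pyGetD acc (-(i + 1)) 0 + 1))
      (List.replicate N q)
    = List.replicate (N - r) q ++ List.replicate r (q + 1) := by
  induction r with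
  | zero => simp
  | succ k ih =>
    have h2 : PySem.List.pyRange 0 (((k : Nat) + 1 : Nat) : Int) 1
        = PySem.List.pyRange 0 (k : Int) 1 ++ [(k : Int)] := by
      push_cast
      exact PySem.List.pyRange_one_succ_right (by positivity)
    rw [h2, List.foldl_append, ih (by omega)]
    simp only [List.foldl]
    exact pv_step N k q hr

-- B's greedy invariant: folding slots = i, i-1, …, 1 over remaining = q*i + r (0 ≤ r < i)
-- appends i - r copies of q followed by r copies of q + 1, and ends with remaining 0.
theorem pv_greedy (i : Nat) :
    ∀ (q r : Int) (acc : List Int), 0 < (i : Int) → 0 ≤ r → r < i →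
    (PySem.List.pyRange (i : Int) 0 (-1)).foldl
      (fun (st : List Int × Int) slots =>
        (st.1 ++ [PySem.Int.floordiv st.2 slots], st.2 - PySem.Int.floordiv st.2 slots))
      (acc, q * i + r)
    = (acc ++ List.replicate (i - r.toNat) q ++ List.replicate r.toNat (q + 1), 0) := by
  induction i with
  | zero => intro q r acc hi; simp at hi
  | succ k ih =>
    intro q r acc hi h0 hr
    rw [PySem.List.pyRange_neg_one_cons (by exact_mod_cast hi)]
    simp only [List.foldl]
    push_cast
    have hq : PySem.Int.floordiv (q * ((k : Int) + 1) + r) ((k : Int) + 1) = q := by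
      rw [PySem.Int.floordiv_eq_iff_of_pos (by positivity)]
      constructor
      · nlinarith
      · push_cast at hr; nlinarith
    rw [hq]
    by_cases hk : (k : Int) = 0
    · -- last slot: r = 0, remainder goes to nothing
      have hk0 : k = 0 := by exact_mod_cast hk
      subst hk0
      have hr0 : r = 0 := by omega
      rw [PySem.List.pyRange_neg_one_eq_nil (by omega)]
      simp [hr0]
    · have hkpos : 0 < (k : Int) := by omega
      have harith : q * ((k : Int) + 1) + r - q = q * (k : Int) + r := by ring
      rw [show ((k : Int) + 1 - 1) = (k : Int) from by ring, harith]
      by_cases hlt : r < (k : Int)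
      · rw [ih q r (acc ++ [q]) hkpos h0 hlt]
        rw [List.append_assoc, List.append_assoc, List.append_assoc]
        congr 2
        rw [← List.append_assoc, show k + 1 - r.toNat = (k - r.toNat) + 1 from by omega,
            List.replicate_succ]
        simp
      · -- r = k: remaining = (q+1)*k, all further slots get q + 1
        have hrk : r = (k : Int) := by omega
        have h2 : q * (k : Int) + r = (q + 1) * (k : Int) + 0 := by rw [hrk]; ring
        rw [h2, ih (q + 1) 0 (acc ++ [q]) hkpos (le_refl 0) hkpos]
        simp [hrk, show k + 1 - k = 1 from by omega, List.replicate_succ]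

-- ===== VERDICT (by name: the statements are the Claim_ definitions above) =====
theorem solution_spec : Claim_equal_solution := by
  intro n s _ hpre
  unfold Spec_solution solution solution_alt
  by_cases hlt : s < n
  · simp [hlt]
  · simp only [hlt, if_false]
    rcases lt_trichotomy n 0 with hn | hn | hn
    · -- n < 0: A's increment range and B's countdown range are both empty; both sides are []
      have hb := PySem.Int.mod_neg_bounds (a := s) hn
      rw [PySem.List.pyRange_one_eq_nil (by omega), PySem.List.pyRange_neg_one_eq_nil (by omega)]
      have h1 : n.toNat = 0 := by omega
      simp [h1]
    · rcases hpre with h | h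
      · exact absurd hn h
      · exact absurd (by omega : s < n) hlt
    · -- n > 0: both produce the two constant blocks
      have h0 := PySem.Int.mod_nonneg s hn
      have h1 := PySem.Int.mod_lt s hn
      have hdm := PySem.Int.floordiv_mul_add_mod s n
      have hr : (PySem.Int.mod s n) = (((PySem.Int.mod s n).toNat : Nat) : Int) := by omega
      have hs : s = PySem.Int.floordiv s n * n + PySem.Int.mod s n := by omega
      conv_lhs => rw [hr]
      rw [pv_loop n.toNat (PySem.Int.mod s n).toNat _ (by omega)]
      have hgr := pv_greedy n.toNat (PySem.Int.floordiv s n) (PySem.Int.mod s n) []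
            (by omega) h0 (by omega)
      rw [show ((n.toNat : Nat) : Int) = n from by omega] at hgr
      rw [hdm] at hgr
      rw [hgr]
      simp
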